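-- pv_equiv track=rewrite | github.com/JinSon12/AlgorithmsPractice | 백준/골드5/SEP_1_암호만들기.py | findCombinationLetter
-- ===== SOURCE A (Python) =====
-- def findCombinationLetter(s, target):
--     res = []
--     vowels = set({"a", "e", "i", "o", "u"})
--
--     s.sort()
--
--     def dfs(pos, sSoFar, cntV, cntC):
--         if len(sSoFar) == target and cntV >= 1 and cntC >= 2:
--             res.append(sSoFar)
--             return
--
--         for i in range(pos, len(s)):
--             if s[i] in vowels:
--                 dfs(i + 1, sSoFar + s[i], cntV + 1, cntC)
--             else:
--                 dfs(i + 1, sSoFar + s[i], cntV, cntC + 1)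
--
--     dfs(0, "", 0, 0)
--
--     return res
-- ===== SOURCE B (Python) =====
-- def findCombinationLetter(s, target):
--     vowels = {"a", "e", "i", "o", "u"}
--     s.sort()
--     res = []
--     stack = [(0, "", 0, 0)]
--     while stack:
--         pos, cur, cv, cc = stack.pop()
--         if len(cur) == target and cv >= 1 and cc >= 2:
--             res.append(cur)
--             continue
--         if len(cur) > target:
--             continue  # lengths only grow: no descendant can reach target
--         for i in range(len(s) - 1, pos - 1, -1):
--             w = s[i]
--             if w in vowels:
--                 stack.append((i + 1, cur + w, cv + 1, cc))
--             else:
--                 stack.append((i + 1, cur + w, cv, cc + 1))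
--     return res
-- ===== Notes on version B (the rewrite author's own statement) =====
-- stated objective: alternative
-- what changed: Recursive nested-closure DFS replaced by an iterative explicit-stack loop that additionally prunes every branch whose accumulated string already exceeds the target length, so overlong subsets are never explored.
import Mathlib
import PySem

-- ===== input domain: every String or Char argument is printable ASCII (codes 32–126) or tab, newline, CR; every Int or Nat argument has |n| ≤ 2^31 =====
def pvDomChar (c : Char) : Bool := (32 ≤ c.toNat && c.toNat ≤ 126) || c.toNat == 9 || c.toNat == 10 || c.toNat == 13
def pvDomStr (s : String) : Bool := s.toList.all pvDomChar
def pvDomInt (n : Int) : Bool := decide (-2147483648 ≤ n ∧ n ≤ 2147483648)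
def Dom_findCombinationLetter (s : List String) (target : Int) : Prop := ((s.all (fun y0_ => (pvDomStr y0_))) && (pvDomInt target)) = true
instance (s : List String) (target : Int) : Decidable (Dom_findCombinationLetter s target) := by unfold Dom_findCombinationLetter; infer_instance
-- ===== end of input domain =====

-- B replaces A's recursive DFS by an iterative explicit-stack DFS that prunes branches whose
-- accumulated string is already longer than target; both sort the argument list in place in
-- Python (the equivalence proved here is about the return value).

-- ===== PORT A =====
-- the vowel set {"a","e","i","o","u"} (distinct literals, so a plain list is the PySem.Set)
def pvVowels : List String := ["a", "e", "i", "o", "u"]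

mutual
-- the inner recursive dfs; the index pos into the sorted list is carried as the suffix l = s[pos:]
def dfsA (target : Int) (l : List String) (cur : List Char) (cv cc : Int) : List String :=
  if ((cur.length : Int) = target ∧ 1 ≤ cv ∧ 2 ≤ cc) then [String.mk cur]
  else loopA target l cur cv cc
termination_by (l.length, 1)

-- the `for i in range(pos, len(s))` loop, iterating over the suffix
def loopA (target : Int) (l : List String) (cur : List Char) (cv cc : Int) : List String :=
  match l with
  | [] => []
  | w :: rest =>
    (if pvVowels.contains w then dfsA target rest (cur ++ w.toList) (cv + 1) cc
     else dfsA target rest (cur ++ w.toList) cv (cc + 1)) ++ loopA target rest cur cv cc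
termination_by (l.length, 0)
end

def findCombinationLetter (s : List String) (target : Int) : List String :=
  dfsA target (PySem.List.sorted s (fun x => x) false) [] 0 0

-- ===== PORT B =====
-- a stack frame: (remaining suffix s[pos:], current string, vowel count, consonant count)
def pvFrame : Type := List String × List Char × Int × Int

-- the Python pushes the children in reversed index order and pops them LIFO; the net effect,
-- ported here, is that the children in forward order are prepended to the stack
def pushB (l : List String) (cur : List Char) (cv cc : Int) : List pvFrame :=
  match l with
  | [] => []
  | w :: rest =>
    (if pvVowels.contains w then (rest, cur ++ w.toList, cv + 1, cc)
     else (rest, cur ++ w.toList, cv, cc + 1)) :: pushB rest cur cv cc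

-- termination weight of a frame / a stack
def pvWt (f : pvFrame) : Nat := 2 ^ (f.1.length + 1)
def pvSwt (stk : List pvFrame) : Nat := (stk.map pvWt).sum

theorem pvSwt_pushB (l : List String) (cur : List Char) (cv cc : Int) :
    pvSwt (pushB l cur cv cc) + 2 = 2 ^ (l.length + 1) := by
  induction l with
  | nil => simp [pushB, pvSwt]
  | cons w rest ih =>
    simp only [pushB, pvSwt, List.map_cons, List.sum_cons, List.length_cons, pow_succ] at *
    split <;> simp only [pvWt, pow_succ] <;> omega

theorem pvSwt_append (a b : List pvFrame) : pvSwt (a ++ b) = pvSwt a + pvSwt b := by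
  simp [pvSwt]

-- the while-loop over the explicit stack
def runB (target : Int) (stk : List pvFrame) : List String :=
  match stk with
  | [] => []
  | (l, cur, cv, cc) :: rest =>
    if ((cur.length : Int) = target ∧ 1 ≤ cv ∧ 2 ≤ cc) then String.mk cur :: runB target rest
    else if target < (cur.length : Int) then runB target rest   -- prune: lengths only grow
    else runB target (pushB l cur cv cc ++ rest)
termination_by pvSwt stk
decreasing_by
  · simp only [pvSwt, List.map_cons, List.sum_cons, pvWt]
    have : 0 < 2 ^ (l.length + 1) := Nat.two_pow_pos _
    omega
  · simp only [pvSwt, List.map_cons, List.sum_cons, pvWt]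
    have : 0 < 2 ^ (l.length + 1) := Nat.two_pow_pos _
    omega
  · have h := pvSwt_pushB l cur cv cc
    have h2 := pvSwt_append (pushB l cur cv cc) rest
    simp only [pvSwt, List.map_cons, List.sum_cons, pvWt] at *
    omega

def findCombinationLetter_alt (s : List String) (target : Int) : List String :=
  runB target [(PySem.List.sorted s (fun x => x) false, [], 0, 0)]

-- ===== PRECONDITION & SPEC =====
def Spec_findCombinationLetter (s : List String) (target : Int) (out : List String) : Prop := out = findCombinationLetter_alt s target
instance (s : List String) (target : Int) (out : List String) : Decidable (Spec_findCombinationLetter s target out) := by unfold Spec_findCombinationLetter; infer_instance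

-- ===== CLAIM (what is proved, stated in full; the proofs are below) =====
def Claim_equal_findCombinationLetter : Prop := ∀ (s : List String) (target : Int), Dom_findCombinationLetter s target → Spec_findCombinationLetter s target (findCombinationLetter s target)

-- ===== LEMMAS AND PROOFS =====

-- once the accumulated string is longer than target it can never be appended again
theorem dfsA_prune (target : Int) (l : List String) :
    ∀ (cur : List Char) (cv cc : Int), target < (cur.length : Int) →
      dfsA target l cur cv cc = [] := by
  induction l with
  | nil =>
    intro cur cv cc h
    rw [dfsA, if_neg (by rintro ⟨hc, -⟩; omega)]
    simp [loopA]
  | cons w rest ih =>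
    intro cur cv cc h
    rw [dfsA, if_neg (by rintro ⟨hc, -⟩; omega), loopA]
    have hlen : target < (((cur ++ w.toList).length : Nat) : Int) := by
      simp only [List.length_append]; push_cast; omega
    have h3 : loopA target rest cur cv cc = dfsA target rest cur cv cc := by
      rw [dfsA, if_neg (by rintro ⟨hc, -⟩; omega)]
    rw [h3]
    split <;> simp [ih _ _ _ hlen, ih cur cv cc h]

-- the children pushed by B, run through A's dfs, are exactly A's inner loop
theorem loopA_eq_pushB (target : Int) (l : List String) (cur : List Char) (cv cc : Int) :
    loopA target l cur cv cc
      = ((pushB l cur cv cc).map (fun f => dfsA target f.1 f.2.1 f.2.2.1 f.2.2.2)).flatten := by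
  induction l generalizing cur cv cc with
  | nil => simp [loopA, pushB]
  | cons w rest ih =>
    simp only [loopA, pushB, List.map_cons, List.flatten_cons]
    split <;> simp [ih]

-- the stack machine computes the concatenation of A's dfs over its frames
theorem runB_eq (target : Int) (stk : List pvFrame) :
    runB target stk = (stk.map (fun f => dfsA target f.1 f.2.1 f.2.2.1 f.2.2.2)).flatten := by
  fun_induction runB target stk with
  | case1 => simp
  | case2 l cur cv cc rest hc ih =>
    simp only [List.map_cons, List.flatten_cons]
    rw [ih, dfsA, if_pos hc]
    simp
  | case3 l cur cv cc rest hc hp ih =>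
    simp only [List.map_cons, List.flatten_cons]
    rw [ih, dfsA_prune target l cur cv cc hp]
    simp
  | case4 l cur cv cc rest hc hp ih =>
    simp only [List.map_cons, List.flatten_cons]
    rw [ih]
    simp only [List.map_append, List.flatten_append]
    rw [← loopA_eq_pushB, dfsA, if_neg hc]

-- ===== VERDICT (by name: the statement is the Claim_ definition above) =====
theorem findCombinationLetter_spec : Claim_equal_findCombinationLetter := by
  intro s target _
  unfold Spec_findCombinationLetter findCombinationLetter findCombinationLetter_alt
  rw [runB_eq]
  simp
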